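-- pv_equiv track=rewrite | github.com/SAHIL511-JJ/nlp-engine | backend/services/schema_discovery.py | match_synonym
-- ===== SOURCE A (Python) =====
-- SYNONYM_MAP = {
-- 	'employee': ['employee', 'employees', 'emp', 'staff', 'personnel'],
-- 	' department': ['department', 'dept', 'division', 'team'],
-- 	'salary': ['salary', 'compensation', 'pay', 'annual_salary', 'pay_rate'],
-- 	'name': ['name', 'full_name', 'employee_name'],
-- 	'id': ['id', 'emp_id', 'employee_id', 'person_id'],
-- }
--
-- def normalize_identifier(name: str) -> str:
-- 	return name.lower().strip()
--
-- def match_synonym(term: str, candidates: list[str]) -> str | None: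
-- 	term_n = normalize_identifier(term)
-- 	for canon, alts in SYNONYM_MAP.items():
-- 		if term_n in (normalize_identifier(a) for a in alts):
-- 			for cand in candidates:
-- 				if normalize_identifier(cand) in (normalize_identifier(a) for a in alts):
-- 					return cand
-- 	return None
-- ===== SOURCE B (Python) =====
-- SYNONYM_MAP = {
-- 	'employee': ['employee', 'employees', 'emp', 'staff', 'personnel'],
-- 	' department': ['department', 'dept', 'division', 'team'],
-- 	'salary': ['salary', 'compensation', 'pay', 'annual_salary', 'pay_rate'],
-- 	'name': ['name', 'full_name', 'employee_name'],
-- 	'id': ['id', 'emp_id', 'employee_id', 'person_id'],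
-- }
--
-- def normalize_identifier(name: str) -> str:
-- 	return name.lower().strip()
--
-- # index built once: normalized alt -> canonical group key
-- ALT_TO_CANON = {
-- 	normalize_identifier(a): canon
-- 	for canon, alts in SYNONYM_MAP.items()
-- 	for a in alts
-- }
--
-- def match_synonym(term: str, candidates: list[str]) -> str | None:
-- 	term_canon = ALT_TO_CANON.get(normalize_identifier(term))
-- 	if term_canon is None:
-- 		return None
-- 	for cand in candidates:
-- 		if ALT_TO_CANON.get(normalize_identifier(cand)) == term_canon:
-- 			return cand
-- 	return None
-- ===== Notes on version B (the rewrite author's own statement) =====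
-- stated objective: simpler
-- what changed: Replaced A's per-call nested scan over synonym groups and their alt lists by a precomputed normalized-alt-to-canonical-key index (ALT_TO_CANON) consulted once for the term and once per candidate in a single pass.
import Mathlib
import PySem

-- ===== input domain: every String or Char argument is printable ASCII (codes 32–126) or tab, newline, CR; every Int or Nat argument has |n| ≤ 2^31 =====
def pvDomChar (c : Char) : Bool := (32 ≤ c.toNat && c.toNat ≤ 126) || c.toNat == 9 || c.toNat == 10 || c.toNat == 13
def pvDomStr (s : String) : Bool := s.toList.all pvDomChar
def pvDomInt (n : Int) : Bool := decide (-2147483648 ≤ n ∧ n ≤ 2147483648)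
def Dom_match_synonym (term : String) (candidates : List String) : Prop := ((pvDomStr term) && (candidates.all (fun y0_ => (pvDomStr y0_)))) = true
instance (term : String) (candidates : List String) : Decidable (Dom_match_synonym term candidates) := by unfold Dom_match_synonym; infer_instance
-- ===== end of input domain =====

-- B replaces A's nested group/alt scan by a precomputed alt→canonical-key index and a single
-- candidate pass (objective: simpler; same observable results).

-- ===== PORT A =====
def pySynMap : List (String × List String) :=
  [("employee", ["employee", "employees", "emp", "staff", "personnel"]),
   (" department", ["department", "dept", "division", "team"]),
   ("salary", ["salary", "compensation", "pay", "annual_salary", "pay_rate"]),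
   ("name", ["name", "full_name", "employee_name"]),
   ("id", ["id", "emp_id", "employee_id", "person_id"])]

def normalize_identifier (name : String) : String := PySem.Str.strip (PySem.Str.lower name)

-- inner 'for cand in candidates' loop of A
def msInner (alts : List String) : List String → Option String
  | [] => none
  | c :: rest =>
      if (alts.map normalize_identifier).contains (normalize_identifier c) then some c
      else msInner alts rest

-- outer 'for canon, alts in SYNONYM_MAP.items()' loop of A
def msOuter (term_n : String) (candidates : List String) : List (String × List String) → Option String
  | [] => none
  | (_, alts) :: rest =>
      if (alts.map normalize_identifier).contains term_n then
        match msInner alts candidates with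
        | some c => some c
        | none => msOuter term_n candidates rest
      else msOuter term_n candidates rest

def match_synonym (term : String) (candidates : List String) : Option String :=
  msOuter (normalize_identifier term) candidates pySynMap

-- ===== PORT B =====
-- ALT_TO_CANON, built once from the synonym map
def altToCanon : PySem.Dict String String :=
  pySynMap.foldl
    (fun d ca => ca.2.foldl (fun d a => d.insert (normalize_identifier a) ca.1) d)
    PySem.Dict.empty

def match_synonym_alt (term : String) (candidates : List String) : Option String :=
  match altToCanon.get? (normalize_identifier term) with
  | none => none
  | some tc => candidates.find? (fun c => altToCanon.get? (normalize_identifier c) == some tc)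

-- ===== PRECONDITION & SPEC =====
def Spec_match_synonym (term : String) (candidates : List String) (out : Option String) : Prop := out = match_synonym_alt term candidates
instance (term : String) (candidates : List String) (out : Option String) : Decidable (Spec_match_synonym term candidates out) := by unfold Spec_match_synonym; infer_instance

-- ===== CLAIM (what is proved, stated in full; the proofs are below) =====
def Claim_equal_match_synonym : Prop := ∀ (term : String) (candidates : List String), Dom_match_synonym term candidates → Spec_match_synonym term candidates (match_synonym term candidates)

-- ===== LEMMAS AND PROOFS =====

-- the index, evaluated
set_option maxHeartbeats 1000000 in
lemma altToCanon_eval : altToCanon = PySem.Dict.mk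
  [("employee", "employee"), ("employees", "employee"), ("emp", "employee"),
   ("staff", "employee"), ("personnel", "employee"),
   ("department", " department"), ("dept", " department"), ("division", " department"),
   ("team", " department"),
   ("salary", "salary"), ("compensation", "salary"), ("pay", "salary"),
   ("annual_salary", "salary"), ("pay_rate", "salary"),
   ("name", "name"), ("full_name", "name"), ("employee_name", "name"),
   ("id", "id"), ("emp_id", "id"), ("employee_id", "id"), ("person_id", "id")] := by
  decide

-- lookup in the index, characterised group by group
set_option maxHeartbeats 4000000 in
set_option maxRecDepth 10000 in
lemma get?_altToCanon (s : String) :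
    altToCanon.get? s =
      if ["employee", "employees", "emp", "staff", "personnel"].contains s then some "employee"
      else if ["department", "dept", "division", "team"].contains s then some " department"
      else if ["salary", "compensation", "pay", "annual_salary", "pay_rate"].contains s then some "salary"
      else if ["name", "full_name", "employee_name"].contains s then some "name"
      else if ["id", "emp_id", "employee_id", "person_id"].contains s then some "id"
      else none := by
  rw [altToCanon_eval]
  by_cases h1 : s = "employee"
  · subst h1; decide
  by_cases h2 : s = "employees"
  · subst h2; decide
  by_cases h3 : s = "emp"
  · subst h3; decide
  by_cases h4 : s = "staff"
  · subst h4; decide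
  by_cases h5 : s = "personnel"
  · subst h5; decide
  by_cases h6 : s = "department"
  · subst h6; decide
  by_cases h7 : s = "dept"
  · subst h7; decide
  by_cases h8 : s = "division"
  · subst h8; decide
  by_cases h9 : s = "team"
  · subst h9; decide
  by_cases h10 : s = "salary"
  · subst h10; decide
  by_cases h11 : s = "compensation"
  · subst h11; decide
  by_cases h12 : s = "pay"
  · subst h12; decide
  by_cases h13 : s = "annual_salary"
  · subst h13; decide
  by_cases h14 : s = "pay_rate"
  · subst h14; decide
  by_cases h15 : s = "name"
  · subst h15; decide
  by_cases h16 : s = "full_name"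
  · subst h16; decide
  by_cases h17 : s = "employee_name"
  · subst h17; decide
  by_cases h18 : s = "id"
  · subst h18; decide
  by_cases h19 : s = "emp_id"
  · subst h19; decide
  by_cases h20 : s = "employee_id"
  · subst h20; decide
  by_cases h21 : s = "person_id"
  · subst h21; decide
  simp only [PySem.Dict.get?_mk_cons]
  rw [if_neg (fun h => h1 (eq_of_beq h).symm)]
  rw [if_neg (fun h => h2 (eq_of_beq h).symm)]
  rw [if_neg (fun h => h3 (eq_of_beq h).symm)]
  rw [if_neg (fun h => h4 (eq_of_beq h).symm)]
  rw [if_neg (fun h => h5 (eq_of_beq h).symm)]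
  rw [if_neg (fun h => h6 (eq_of_beq h).symm)]
  rw [if_neg (fun h => h7 (eq_of_beq h).symm)]
  rw [if_neg (fun h => h8 (eq_of_beq h).symm)]
  rw [if_neg (fun h => h9 (eq_of_beq h).symm)]
  rw [if_neg (fun h => h10 (eq_of_beq h).symm)]
  rw [if_neg (fun h => h11 (eq_of_beq h).symm)]
  rw [if_neg (fun h => h12 (eq_of_beq h).symm)]
  rw [if_neg (fun h => h13 (eq_of_beq h).symm)]
  rw [if_neg (fun h => h14 (eq_of_beq h).symm)]
  rw [if_neg (fun h => h15 (eq_of_beq h).symm)]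
  rw [if_neg (fun h => h16 (eq_of_beq h).symm)]
  rw [if_neg (fun h => h17 (eq_of_beq h).symm)]
  rw [if_neg (fun h => h18 (eq_of_beq h).symm)]
  rw [if_neg (fun h => h19 (eq_of_beq h).symm)]
  rw [if_neg (fun h => h20 (eq_of_beq h).symm)]
  rw [if_neg (fun h => h21 (eq_of_beq h).symm)]
  rw [if_neg (by simp [List.contains_eq_mem, h1, h2, h3, h4, h5])]
  rw [if_neg (by simp [List.contains_eq_mem, h6, h7, h8, h9])]
  rw [if_neg (by simp [List.contains_eq_mem, h10, h11, h12, h13, h14])]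
  rw [if_neg (by simp [List.contains_eq_mem, h15, h16, h17])]
  rw [if_neg (by simp [List.contains_eq_mem, h18, h19, h20, h21])]
  rfl

-- A's inner loop is a find? over candidates
lemma msInner_eq_find? (alts : List String) (cands : List String) :
    msInner alts cands =
      cands.find? (fun c => (alts.map normalize_identifier).contains (normalize_identifier c)) := by
  induction cands with
  | nil => rfl
  | cons c rest ih =>
      simp only [msInner, List.find?]
      cases h : (alts.map normalize_identifier).contains (normalize_identifier c) <;>
        simp only [h, if_true, if_false, ih, Bool.false_eq_true, if_neg, ite_false, ite_true]

lemma mapNorm1 : (["employee", "employees", "emp", "staff", "personnel"].map normalize_identifier) = ["employee", "employees", "emp", "staff", "personnel"] := by decide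

lemma mapNorm2 : (["department", "dept", "division", "team"].map normalize_identifier) = ["department", "dept", "division", "team"] := by decide

lemma mapNorm3 : (["salary", "compensation", "pay", "annual_salary", "pay_rate"].map normalize_identifier) = ["salary", "compensation", "pay", "annual_salary", "pay_rate"] := by decide

lemma mapNorm4 : (["name", "full_name", "employee_name"].map normalize_identifier) = ["name", "full_name", "employee_name"] := by decide

lemma mapNorm5 : (["id", "emp_id", "employee_id", "person_id"].map normalize_identifier) = ["id", "emp_id", "employee_id", "person_id"] := by decide

lemma disj1 (s : String) (h : (["employee", "employees", "emp", "staff", "personnel"].contains s) = true) :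
    (["department", "dept", "division", "team"].contains s) = false ∧ (["salary", "compensation", "pay", "annual_salary", "pay_rate"].contains s) = false ∧ (["name", "full_name", "employee_name"].contains s) = false ∧ (["id", "emp_id", "employee_id", "person_id"].contains s) = false := by
  simp only [List.contains_eq_mem, List.mem_cons, List.not_mem_nil, or_false,
    decide_eq_true_eq] at h
  rcases h with rfl|rfl|rfl|rfl|rfl <;> decide

lemma disj2 (s : String) (h : (["department", "dept", "division", "team"].contains s) = true) :
    (["employee", "employees", "emp", "staff", "personnel"].contains s) = false ∧ (["salary", "compensation", "pay", "annual_salary", "pay_rate"].contains s) = false ∧ (["name", "full_name", "employee_name"].contains s) = false ∧ (["id", "emp_id", "employee_id", "person_id"].contains s) = false := by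
  simp only [List.contains_eq_mem, List.mem_cons, List.not_mem_nil, or_false,
    decide_eq_true_eq] at h
  rcases h with rfl|rfl|rfl|rfl <;> decide

lemma disj3 (s : String) (h : (["salary", "compensation", "pay", "annual_salary", "pay_rate"].contains s) = true) :
    (["employee", "employees", "emp", "staff", "personnel"].contains s) = false ∧ (["department", "dept", "division", "team"].contains s) = false ∧ (["name", "full_name", "employee_name"].contains s) = false ∧ (["id", "emp_id", "employee_id", "person_id"].contains s) = false := by
  simp only [List.contains_eq_mem, List.mem_cons, List.not_mem_nil, or_false,
    decide_eq_true_eq] at h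
  rcases h with rfl|rfl|rfl|rfl|rfl <;> decide

lemma disj4 (s : String) (h : (["name", "full_name", "employee_name"].contains s) = true) :
    (["employee", "employees", "emp", "staff", "personnel"].contains s) = false ∧ (["department", "dept", "division", "team"].contains s) = false ∧ (["salary", "compensation", "pay", "annual_salary", "pay_rate"].contains s) = false ∧ (["id", "emp_id", "employee_id", "person_id"].contains s) = false := by
  simp only [List.contains_eq_mem, List.mem_cons, List.not_mem_nil, or_false,
    decide_eq_true_eq] at h
  rcases h with rfl|rfl|rfl <;> decide

lemma disj5 (s : String) (h : (["id", "emp_id", "employee_id", "person_id"].contains s) = true) :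
    (["employee", "employees", "emp", "staff", "personnel"].contains s) = false ∧ (["department", "dept", "division", "team"].contains s) = false ∧ (["salary", "compensation", "pay", "annual_salary", "pay_rate"].contains s) = false ∧ (["name", "full_name", "employee_name"].contains s) = false := by
  simp only [List.contains_eq_mem, List.mem_cons, List.not_mem_nil, or_false,
    decide_eq_true_eq] at h
  rcases h with rfl|rfl|rfl|rfl <;> decide

lemma pred1 (s : String) :
    (["employee", "employees", "emp", "staff", "personnel"].contains s) = (altToCanon.get? s == some "employee") := by
  by_cases h : (["employee", "employees", "emp", "staff", "personnel"].contains s) = true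
  · obtain ⟨n1, n2, n3, n4⟩ := disj1 s h
    rw [get?_altToCanon]; split_ifs <;> simp_all
  · rw [get?_altToCanon]; split_ifs <;> simp_all

lemma pred2 (s : String) :
    (["department", "dept", "division", "team"].contains s) = (altToCanon.get? s == some " department") := by
  by_cases h : (["department", "dept", "division", "team"].contains s) = true
  · obtain ⟨n1, n2, n3, n4⟩ := disj2 s h
    rw [get?_altToCanon]; split_ifs <;> simp_all
  · rw [get?_altToCanon]; split_ifs <;> simp_all

lemma pred3 (s : String) :
    (["salary", "compensation", "pay", "annual_salary", "pay_rate"].contains s) = (altToCanon.get? s == some "salary") := by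
  by_cases h : (["salary", "compensation", "pay", "annual_salary", "pay_rate"].contains s) = true
  · obtain ⟨n1, n2, n3, n4⟩ := disj3 s h
    rw [get?_altToCanon]; split_ifs <;> simp_all
  · rw [get?_altToCanon]; split_ifs <;> simp_all

lemma pred4 (s : String) :
    (["name", "full_name", "employee_name"].contains s) = (altToCanon.get? s == some "name") := by
  by_cases h : (["name", "full_name", "employee_name"].contains s) = true
  · obtain ⟨n1, n2, n3, n4⟩ := disj4 s h
    rw [get?_altToCanon]; split_ifs <;> simp_all
  · rw [get?_altToCanon]; split_ifs <;> simp_all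

lemma pred5 (s : String) :
    (["id", "emp_id", "employee_id", "person_id"].contains s) = (altToCanon.get? s == some "id") := by
  by_cases h : (["id", "emp_id", "employee_id", "person_id"].contains s) = true
  · obtain ⟨n1, n2, n3, n4⟩ := disj5 s h
    rw [get?_altToCanon]; split_ifs <;> simp_all
  · rw [get?_altToCanon]; split_ifs <;> simp_all

lemma key_lemma (t : String) (cands : List String) :
    msOuter t cands pySynMap =
      (match altToCanon.get? t with
       | none => none
       | some tc => cands.find? (fun c => altToCanon.get? (normalize_identifier c) == some tc)) := by
  rw [get?_altToCanon]
  by_cases c1 : (["employee", "employees", "emp", "staff", "personnel"].contains t) = true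
  · rw [if_pos c1]
    show msOuter t cands pySynMap =
      cands.find? (fun c => altToCanon.get? (normalize_identifier c) == some "employee")
    obtain ⟨n2, n3, n4, n5⟩ := disj1 t c1
    simp only [pySynMap, msOuter, mapNorm1, mapNorm2, mapNorm3, mapNorm4, mapNorm5, c1, n2, n3, n4, n5, eq_self_iff_true, if_true,
      Bool.false_eq_true, if_false, ite_true, ite_false]
    rw [msInner_eq_find?]
    simp only [mapNorm1, pred1]
    cases List.find? (fun c => altToCanon.get? (normalize_identifier c) == some "employee") cands <;> rfl
  by_cases c2 : (["department", "dept", "division", "team"].contains t) = true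
  · rw [if_neg c1, if_pos c2]
    show msOuter t cands pySynMap =
      cands.find? (fun c => altToCanon.get? (normalize_identifier c) == some " department")
    obtain ⟨n1, n3, n4, n5⟩ := disj2 t c2
    simp only [pySynMap, msOuter, mapNorm1, mapNorm2, mapNorm3, mapNorm4, mapNorm5, c2, n1, n3, n4, n5, eq_self_iff_true, if_true,
      Bool.false_eq_true, if_false, ite_true, ite_false]
    rw [msInner_eq_find?]
    simp only [mapNorm2, pred2]
    cases List.find? (fun c => altToCanon.get? (normalize_identifier c) == some " department") cands <;> rfl
  by_cases c3 : (["salary", "compensation", "pay", "annual_salary", "pay_rate"].contains t) = true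
  · rw [if_neg c1, if_neg c2, if_pos c3]
    show msOuter t cands pySynMap =
      cands.find? (fun c => altToCanon.get? (normalize_identifier c) == some "salary")
    obtain ⟨n1, n2, n4, n5⟩ := disj3 t c3
    simp only [pySynMap, msOuter, mapNorm1, mapNorm2, mapNorm3, mapNorm4, mapNorm5, c3, n1, n2, n4, n5, eq_self_iff_true, if_true,
      Bool.false_eq_true, if_false, ite_true, ite_false]
    rw [msInner_eq_find?]
    simp only [mapNorm3, pred3]
    cases List.find? (fun c => altToCanon.get? (normalize_identifier c) == some "salary") cands <;> rfl
  by_cases c4 : (["name", "full_name", "employee_name"].contains t) = true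
  · rw [if_neg c1, if_neg c2, if_neg c3, if_pos c4]
    show msOuter t cands pySynMap =
      cands.find? (fun c => altToCanon.get? (normalize_identifier c) == some "name")
    obtain ⟨n1, n2, n3, n5⟩ := disj4 t c4
    simp only [pySynMap, msOuter, mapNorm1, mapNorm2, mapNorm3, mapNorm4, mapNorm5, c4, n1, n2, n3, n5, eq_self_iff_true, if_true,
      Bool.false_eq_true, if_false, ite_true, ite_false]
    rw [msInner_eq_find?]
    simp only [mapNorm4, pred4]
    cases List.find? (fun c => altToCanon.get? (normalize_identifier c) == some "name") cands <;> rfl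
  by_cases c5 : (["id", "emp_id", "employee_id", "person_id"].contains t) = true
  · rw [if_neg c1, if_neg c2, if_neg c3, if_neg c4, if_pos c5]
    show msOuter t cands pySynMap =
      cands.find? (fun c => altToCanon.get? (normalize_identifier c) == some "id")
    obtain ⟨n1, n2, n3, n4⟩ := disj5 t c5
    simp only [pySynMap, msOuter, mapNorm1, mapNorm2, mapNorm3, mapNorm4, mapNorm5, c5, n1, n2, n3, n4, eq_self_iff_true, if_true,
      Bool.false_eq_true, if_false, ite_true, ite_false]
    rw [msInner_eq_find?]
    simp only [mapNorm5, pred5]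
    cases List.find? (fun c => altToCanon.get? (normalize_identifier c) == some "id") cands <;> rfl
  rw [if_neg c1, if_neg c2, if_neg c3, if_neg c4, if_neg c5]
  show msOuter t cands pySynMap = none
  simp only [Bool.not_eq_true] at c1 c2 c3 c4 c5
  simp only [pySynMap, msOuter, mapNorm1, mapNorm2, mapNorm3, mapNorm4, mapNorm5, c1, c2, c3, c4, c5, Bool.false_eq_true,
    if_false, ite_false]

-- ===== VERDICT (by name: the statement is the Claim_ definition above) =====
theorem match_synonym_spec : Claim_equal_match_synonym := by
  intro term candidates _
  unfold Spec_match_synonym match_synonym match_synonym_alt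
  exact key_lemma (normalize_identifier term) candidates
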